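-- pv_equiv track=rewrite | github.com/openview2017/leetcode-group-solution | InterViewQuestions/OA/Amazon/Flip coins to beautiful sequence/Solution.py | minimumFlip
-- ===== SOURCE A (Python) =====
-- def minimumFlip(coins):
--     count = [0 for i in coins]
--     min_steps = len(coins)
--     # Count the number of 1s on the left side of current node.
--     cur = 0
--     for i in range(len(coins)):
--         count[i] = cur
--         if coins[i] == 1:
--             cur += 1
--     # Count the number of 0s on the right side of current node.
--     cur = 0
--     for i in range(len(coins)-1, -1, -1):
--         count[i] += cur
--         if coins[i] == 0:
--             cur += 1
--         min_steps = min(min_steps, count[i])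
--     return min_steps
-- ===== SOURCE B (Python) =====
-- def minimumFlip(coins):
--     ones = 0
--     flips = 0
--     for c in coins:
--         if c == 1:
--             ones += 1
--         elif c == 0:
--             flips = min(flips + 1, ones)
--     return flips
-- ===== Notes on version B (the rewrite author's own statement) =====
-- stated objective: simpler
-- what changed: Replaced the two index passes over an auxiliary count array (prefix 1-counts, then suffix 0-counts with a running min) by a single forward fold keeping just two integers: the 1s seen so far and the running minimum of flips.
import Mathlib
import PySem

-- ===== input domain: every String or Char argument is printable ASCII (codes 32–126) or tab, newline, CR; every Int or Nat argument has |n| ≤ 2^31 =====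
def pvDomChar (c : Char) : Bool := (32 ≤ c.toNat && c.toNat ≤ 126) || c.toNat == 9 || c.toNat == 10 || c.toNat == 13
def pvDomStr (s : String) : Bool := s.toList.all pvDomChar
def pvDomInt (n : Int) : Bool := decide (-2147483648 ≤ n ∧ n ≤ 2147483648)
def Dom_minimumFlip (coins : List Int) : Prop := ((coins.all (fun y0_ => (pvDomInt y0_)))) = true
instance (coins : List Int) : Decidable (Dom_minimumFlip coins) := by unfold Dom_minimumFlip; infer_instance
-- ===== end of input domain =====

-- B replaces A's two index passes over a count array by a single forward pass keeping two integers (objective: simpler).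

-- ===== PORT A =====
-- Transliteration of A's two loops; inside both loops the index is always in range,
-- so `(pyGet? …).getD 0` in loop 2 is exact there (the `some` case always fires).
def minimumFlip (coins : List Int) : Int :=
  let count := coins.map (fun _ => (0 : Int))          -- count = [0 for i in coins]
  let min_steps : Int := (coins.length : Int)          -- min_steps = len(coins)
  -- for i in range(len(coins)): count[i] = cur; if coins[i] == 1: cur += 1
  let s1 := (PySem.List.pyRange 0 (coins.length : Int) 1).foldl
    (fun (st : List Int × Int) i =>
      (st.1.set i.toNat st.2,
       if PySem.List.pyGet? coins i = some 1 then st.2 + 1 else st.2))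
    (count, 0)
  -- for i in range(len(coins)-1, -1, -1): count[i] += cur; if coins[i] == 0: cur += 1; min_steps = min(min_steps, count[i])
  let s2 := (PySem.List.pyRange ((coins.length : Int) - 1) (-1) (-1)).foldl
    (fun (st : List Int × Int × Int) i =>
      let v := (PySem.List.pyGet? st.1 i).getD 0 + st.2.1
      (st.1.set i.toNat v,
       (if PySem.List.pyGet? coins i = some 0 then st.2.1 + 1 else st.2.1),
       min st.2.2 v))
    (s1.1, 0, min_steps)
  s2.2.2

-- ===== PORT B =====
def minimumFlip_alt (coins : List Int) : Int :=
  (coins.foldl (fun (st : Int × Int) c =>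
      if c = 1 then (st.1 + 1, st.2)
      else if c = 0 then (st.1, min (st.2 + 1) st.1)
      else st) (0, 0)).2

-- ===== PRECONDITION & SPEC =====
def Spec_minimumFlip (coins : List Int) (out : Int) : Prop := out = minimumFlip_alt coins
instance (coins : List Int) (out : Int) : Decidable (Spec_minimumFlip coins out) := by unfold Spec_minimumFlip; infer_instance

-- ===== CLAIM (what is proved, stated in full; the proofs are below) =====
def Claim_equal_minimumFlip : Prop := ∀ (coins : List Int), Dom_minimumFlip coins → Spec_minimumFlip coins (minimumFlip coins)

-- ===== LEMMAS AND PROOFS =====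

-- number of 1s / 0s in a list
def pvOnes (l : List Int) : Int := ((l.filter (fun c => c == 1)).length : Int)
def pvZeros (l : List Int) : Int := ((l.filter (fun c => c == 0)).length : Int)
-- cost of making everything left of i zero and everything right of i one (position i free)
def pvCand (coins : List Int) (i : Nat) : Int :=
  pvOnes (coins.take i) + pvZeros (coins.drop (i + 1))
-- A's result, in closed form (min over candidates, in A's evaluation order)
def pvM (coins : List Int) : Int :=
  (((List.range coins.length).reverse).map (pvCand coins)).foldl min (coins.length : Int)
-- the count array after loop 1, first n cells filled
def pvC1 (coins : List Int) (n : Nat) : List Int :=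
  (List.range coins.length).map (fun i => if i < n then pvOnes (coins.take i) else 0)

theorem pvOnes_append (l r : List Int) : pvOnes (l ++ r) = pvOnes l + pvOnes r := by
  simp [pvOnes, List.filter_append]
theorem pvZeros_append (l r : List Int) : pvZeros (l ++ r) = pvZeros l + pvZeros r := by
  simp [pvZeros, List.filter_append]
theorem pvOnes_le_length (l : List Int) : pvOnes l ≤ (l.length : Int) := by
  simp only [pvOnes, Nat.cast_le]
  exact List.length_filter_le _ _
theorem pvOnes_take_le (l : List Int) (k : Nat) : pvOnes (l.take k) ≤ pvOnes l := by
  conv_rhs => rw [← List.take_append_drop k l]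
  rw [pvOnes_append]
  have : (0:Int) ≤ pvOnes (l.drop k) := by unfold pvOnes; positivity
  omega

theorem fmin_assoc (xs : List Int) (a b : Int) :
    xs.foldl min (min a b) = min a (xs.foldl min b) := by
  induction xs generalizing b with
  | nil => rfl
  | cons x xs ih => simp only [List.foldl_cons, min_assoc, ih]
theorem fmin_le_init (xs : List Int) (a : Int) : xs.foldl min a ≤ a := by
  have h := fmin_assoc xs a a
  rw [min_self] at h
  rw [h]; exact min_le_left _ _
theorem fmin_le_mem {xs : List Int} {y : Int} (hy : y ∈ xs) (a : Int) :
    xs.foldl min a ≤ y := by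
  induction xs generalizing a with
  | nil => cases hy
  | cons x xs ih =>
    simp only [List.foldl_cons]
    rcases List.mem_cons.mp hy with h | h
    · subst h
      exact le_trans (fmin_le_init _ _) (min_le_right _ _)
    · exact ih h _
theorem fmin_map_add (xs : List Int) (a e : Int) :
    (xs.map (fun v => v + e)).foldl min (a + e) = xs.foldl min a + e := by
  induction xs generalizing a with
  | nil => rfl
  | cons x xs ih =>
    simp only [List.map_cons, List.foldl_cons]
    rw [min_add_add_right, ih]

-- loop 1 characterization
theorem loop1_char (coins : List Int) : ∀ n, n ≤ coins.length →
    (PySem.List.pyRange 0 (n : Int) 1).foldl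
      (fun (st : List Int × Int) i =>
        (st.1.set i.toNat st.2,
         if PySem.List.pyGet? coins i = some 1 then st.2 + 1 else st.2))
      (coins.map (fun _ => (0:Int)), 0)
    = (pvC1 coins n, pvOnes (coins.take n)) := by
  intro n hn
  induction n with
  | zero =>
    rw [show ((0:Nat):Int) = 0 from rfl, PySem.List.pyRange_one_eq_nil (by norm_num)]
    simp [pvC1, pvOnes, List.map_const']
  | succ n ih =>
    have hn' : n ≤ coins.length := Nat.le_of_succ_le hn
    have hlt : n < coins.length := hn
    rw [show ((n+1 : Nat) : Int) = (n:Int)+1 by push_cast; ring,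
        PySem.List.pyRange_one_succ_right (by positivity), List.foldl_append, ih hn']
    simp only [List.foldl_cons, List.foldl_nil, Prod.mk.injEq]
    constructor
    · -- the set at index n extends pvC1 n to pvC1 (n+1)
      apply List.ext_getElem
      · simp [pvC1]
      · intro j h1 h2
        have hj : j < coins.length := by simpa [pvC1] using h2
        simp only [Int.toNat_natCast, List.getElem_set, pvC1, List.getElem_map,
          List.getElem_range]
        split_ifs with h3 h4 h5 <;> first | rfl | omega | (subst h3; simp)
    · -- cur becomes the 1-count of the (n+1)-prefix
      rw [PySem.List.pyGet?_natCast, List.getElem?_eq_getElem hlt, List.take_add_one,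
        List.getElem?_eq_getElem hlt]
      simp only [Option.toList_some, pvOnes_append, Option.some.injEq]
      by_cases hc : coins[n] = 1
      · simp [hc, pvOnes]
      · simp [hc, pvOnes, List.filter]
        simp [beq_eq_false_iff_ne.mpr hc]

-- loop 2 characterization
theorem loop2_char (coins : List Int) : ∀ (k : Nat), k ≤ coins.length →
    ∀ (C : List Int) (ms : Int), C.length = coins.length →
    (∀ i : Nat, i < k → PySem.List.pyGet? C (i : Int) = some (pvOnes (coins.take i))) →
    ((PySem.List.pyRange ((k : Int) - 1) (-1) (-1)).foldl
      (fun (st : List Int × Int × Int) i =>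
        let v := (PySem.List.pyGet? st.1 i).getD 0 + st.2.1
        (st.1.set i.toNat v,
         (if PySem.List.pyGet? coins i = some 0 then st.2.1 + 1 else st.2.1),
         min st.2.2 v))
      (C, pvZeros (coins.drop k), ms)).2.2
    = (((List.range k).reverse).map (pvCand coins)).foldl min ms := by
  intro k
  induction k with
  | zero =>
    intro _ C ms _ _
    rw [show ((0:Nat):Int) - 1 = -1 from rfl, PySem.List.pyRange_neg_one_eq_nil (by norm_num)]
    simp
  | succ k ih =>
    intro hk C ms hlen hC
    have hk' : k ≤ coins.length := Nat.le_of_succ_le hk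
    have hlt : k < coins.length := hk
    have hgetC : PySem.List.pyGet? C (k : Int) = some (pvOnes (coins.take k)) :=
      hC k (Nat.lt_succ_self k)
    have hget : PySem.List.pyGet? coins (k : Int) = some coins[k] := by
      rw [PySem.List.pyGet?_natCast, List.getElem?_eq_getElem hlt]
    have hdrop : coins.drop k = coins[k] :: coins.drop (k + 1) :=
      List.drop_eq_getElem_cons hlt
    rw [show ((k+1 : Nat) : Int) - 1 = (k:Int) by push_cast; ring,
        PySem.List.pyRange_neg_one_cons (by omega)]
    simp only [List.foldl_cons, hgetC, hget, Option.getD_some, Int.toNat_natCast]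
    have hcur : (if (some coins[k] : Option Int) = some 0
        then pvZeros (coins.drop (k + 1)) + 1 else pvZeros (coins.drop (k + 1)))
        = pvZeros (coins.drop k) := by
      rw [hdrop]
      by_cases hc : coins[k] = 0
      · simp [hc, pvZeros, List.filter]
      · simp [hc, pvZeros, List.filter, beq_eq_false_iff_ne.mpr hc]
    rw [hcur]
    have hres := ih hk' (C.set k (pvOnes (coins.take k) + pvZeros (coins.drop (k + 1))))
      (min ms (pvOnes (coins.take k) + pvZeros (coins.drop (k + 1))))
      (by simpa using hlen)
      (by
        intro i hi
        rw [PySem.List.pyGet?_natCast, List.getElem?_set]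
        have hik : ¬ k = i := by omega
        simp only [hik, if_false]
        rw [← PySem.List.pyGet?_natCast]
        exact hC i (Nat.lt_succ_of_lt hi))
    rw [hres]
    rw [List.range_succ, List.reverse_append, List.reverse_singleton]
    simp only [List.singleton_append, List.map_cons, List.foldl_cons, pvCand]

theorem A_eq_M (coins : List Int) : minimumFlip coins = pvM coins := by
  simp only [minimumFlip]
  rw [loop1_char coins coins.length le_rfl]
  have hres := loop2_char coins coins.length le_rfl (pvC1 coins coins.length)
    ((coins.length : Int)) (by simp [pvC1])
    (by
      intro i hi
      rw [PySem.List.pyGet?_natCast]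
      simp [pvC1, hi])
  rw [show pvZeros (coins.drop coins.length) = 0 from by simp [pvZeros]] at hres
  exact hres

theorem pvOnes_singleton (x : Int) : pvOnes [x] = if x = 1 then 1 else 0 := by
  by_cases h : x = 1
  · simp [pvOnes, List.filter, h]
  · simp [pvOnes, List.filter, h, beq_eq_false_iff_ne.mpr h]
theorem pvZeros_singleton (x : Int) : pvZeros [x] = if x = 0 then 1 else 0 := by
  by_cases h : x = 0
  · simp [pvZeros, List.filter, h]
  · simp [pvZeros, List.filter, h, beq_eq_false_iff_ne.mpr h]

theorem pvM_append (l : List Int) (x : Int) :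
    pvM (l ++ [x]) = if x = 0 then min (pvM l + 1) (pvOnes l) else pvM l := by
  have hcands : ((List.range (l ++ [x]).length).reverse).map (pvCand (l ++ [x]))
      = pvOnes l :: ((List.range l.length).reverse).map
          (fun i => pvCand l i + pvZeros [x]) := by
    rw [List.length_append, List.length_singleton, List.range_succ, List.reverse_append,
      List.reverse_singleton, List.singleton_append, List.map_cons]
    congr 1
    · -- the new candidate at index l.length
      simp only [pvCand]
      rw [List.take_left, show l.length + 1 = (l ++ [x]).length by simp,
        List.drop_length]
      simp [pvZeros]
    · -- old candidates, each shifted by the zero-count of [x]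
      apply List.map_congr_left
      intro i hi
      have hi' : i < l.length := List.mem_range.mp (List.mem_reverse.mp hi)
      simp only [pvCand]
      rw [List.take_append_of_le_length (le_of_lt hi'),
        List.drop_append_of_le_length hi', pvZeros_append]
      ring
  have hlen : ((l ++ [x]).length : Int) = (l.length : Int) + 1 := by simp
  rw [pvM, hcands, hlen, List.foldl_cons]
  by_cases hx : x = 0
  · -- e = 1: the DP step min(flips+1, ones)
    have hz : pvZeros [x] = 1 := by simp [pvZeros_singleton, hx]
    rw [hz, if_pos hx]
    have : (((List.range l.length).reverse).map (fun i => pvCand l i + 1))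
        = (((List.range l.length).reverse).map (pvCand l)).map (fun v => v + 1) := by
      rw [List.map_map]; rfl
    rw [min_comm, this, fmin_assoc, fmin_map_add]
    rw [min_comm, pvM]
  · -- e = 0: the new candidate list has the same minimum
    have hz : pvZeros [x] = 0 := by simp [pvZeros_singleton, hx]
    rw [hz, if_neg hx]
    simp only [add_zero]
    rcases Decidable.em (l = []) with hnil | hnil
    · subst hnil; simp [pvM, pvOnes]
    · have hn : 1 ≤ l.length := List.length_pos_iff.mpr hnil
      set cands := ((List.range l.length).reverse).map (pvCand l) with hc
      set T := cands.foldl min ((l.length : Int) + 1) with hT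
      have hmem : pvCand l (l.length - 1) ∈ cands := by
        rw [hc]
        exact List.mem_map_of_mem (List.mem_reverse.mpr (List.mem_range.mpr (by omega)))
      have h1 : T ≤ pvCand l (l.length - 1) := fmin_le_mem hmem _
      have h2 : pvCand l (l.length - 1) = pvOnes (l.take (l.length - 1)) := by
        simp only [pvCand]
        rw [show l.length - 1 + 1 = l.length by omega, List.drop_length]
        simp [pvZeros]
      have h3 : pvCand l (l.length - 1) ≤ pvOnes l := by
        rw [h2]; exact pvOnes_take_le l _
      have h4 : pvCand l (l.length - 1) ≤ (l.length : Int) - 1 := by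
        rw [h2]
        refine le_trans (pvOnes_le_length _) ?_
        rw [List.length_take]
        omega
      have h5 : pvM l = min ((l.length : Int)) T := by
        rw [pvM, ← hc, hT, ← fmin_assoc,
          min_eq_left (by omega : (l.length : Int) ≤ (l.length : Int) + 1)]
      rw [min_comm, fmin_assoc, ← hT, h5]
      have hTn : T ≤ (l.length : Int) := by omega
      rw [min_eq_right hTn, min_eq_right (by omega : T ≤ pvOnes l)]

theorem B_char (coins : List Int) :
    coins.foldl (fun (st : Int × Int) c =>
      if c = 1 then (st.1 + 1, st.2)
      else if c = 0 then (st.1, min (st.2 + 1) st.1)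
      else st) (0, 0) = (pvOnes coins, pvM coins) ∧ pvM coins ≤ pvOnes coins := by
  induction coins using List.reverseRecOn with
  | nil => simp [pvM, pvOnes]
  | append_singleton l x ih =>
    obtain ⟨ih1, ih2⟩ := ih
    rw [List.foldl_append, ih1]
    simp only [List.foldl_cons, List.foldl_nil]
    rw [pvM_append, pvOnes_append, pvOnes_singleton]
    by_cases h1 : x = 1
    · simp only [h1]
      refine ⟨by norm_num, ?_⟩
      norm_num
      linarith [ih2]
    · by_cases h0 : x = 0
      · simp only [h0]
        refine ⟨by norm_num, ?_⟩
        norm_num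
      · simp only [if_neg h1, if_neg h0]
        exact ⟨by norm_num, by simpa using ih2⟩

theorem B_eq_M (coins : List Int) : minimumFlip_alt coins = pvM coins := by
  unfold minimumFlip_alt
  rw [(B_char coins).1]

-- ===== VERDICT (by name: the statement is the Claim_ definition above) =====
theorem minimumFlip_spec : Claim_equal_minimumFlip := by
  intro coins _
  unfold Spec_minimumFlip
  rw [A_eq_M, B_eq_M]
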